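-- pv_equiv track=rewrite | github.com/JukNavozn1k/AlgLW1 | 6_7.py | generate_fully_connected_graph
-- ===== SOURCE A (Python) =====
-- def generate_fully_connected_graph(num_vertices):
--     adjacency_matrix = [[0 for _ in range(num_vertices)] for _ in range(num_vertices)]
--     adjacency_list = {vertex: [] for vertex in range(num_vertices)}
--
--     for i in range(num_vertices):
--         for j in range(i + 1, num_vertices):
--
--             adjacency_matrix[i][j] = 1
--             adjacency_matrix[j][i] = 1
--
--
--             adjacency_list[i].append(j)
--             adjacency_list[j].append(i)
--
--     return adjacency_list, adjacency_matrix
-- ===== SOURCE B (Python) =====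
-- def generate_fully_connected_graph(num_vertices):
--     adjacency_list = {i: [j for j in range(num_vertices) if j != i]
--                       for i in range(num_vertices)}
--     adjacency_matrix = [[1 if j != i else 0 for j in range(num_vertices)]
--                         for i in range(num_vertices)]
--     return adjacency_list, adjacency_matrix
-- ===== Notes on version B (the rewrite author's own statement) =====
-- stated objective: idiomatic
-- what changed: Replaces the upper-triangular symmetric double-write (two matrix cells and two list appends per i<j pair, mutating preallocated structures) by independent per-entry comprehensions that scan the full n x n grid once, computing each cell and each neighbour list directly.
import Mathlib
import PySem

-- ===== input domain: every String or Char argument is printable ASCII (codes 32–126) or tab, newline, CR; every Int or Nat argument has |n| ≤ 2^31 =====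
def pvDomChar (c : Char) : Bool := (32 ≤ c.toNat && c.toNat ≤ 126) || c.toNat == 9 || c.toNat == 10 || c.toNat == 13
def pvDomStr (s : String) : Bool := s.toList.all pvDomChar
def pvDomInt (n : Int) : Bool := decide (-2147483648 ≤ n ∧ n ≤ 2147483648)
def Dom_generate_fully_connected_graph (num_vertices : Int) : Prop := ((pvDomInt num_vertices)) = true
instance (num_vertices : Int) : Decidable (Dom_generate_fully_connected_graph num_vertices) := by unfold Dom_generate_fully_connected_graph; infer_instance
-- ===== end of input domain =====

-- B replaces A's upper-triangular symmetric double-write with independent per-entry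
-- comprehensions over the full n×n grid (idiomatic; same O(n^2) cost).


-- ===== PORT A =====
def generate_fully_connected_graph (num_vertices : Int) : (List (Int × List Int)) × List (List Int) :=
  let adjacency_matrix : List (List Int) :=
    (PySem.List.pyRange 0 num_vertices 1).map (fun _ =>
      (PySem.List.pyRange 0 num_vertices 1).map (fun _ => (0 : Int)))
  let adjacency_list : PySem.Dict Int (List Int) :=
    (PySem.List.pyRange 0 num_vertices 1).foldl (fun d vertex => d.insert vertex []) PySem.Dict.empty
  let final :=
    (PySem.List.pyRange 0 num_vertices 1).foldl
      (fun (st : PySem.Dict Int (List Int) × List (List Int)) i =>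
        (PySem.List.pyRange (i + 1) num_vertices 1).foldl
          (fun (st : PySem.Dict Int (List Int) × List (List Int)) j =>
            let m1 := PySem.List.pySetD st.2 i (PySem.List.pySetD (PySem.List.pyGetD st.2 i []) j 1)
            let m2 := PySem.List.pySetD m1 j (PySem.List.pySetD (PySem.List.pyGetD m1 j []) i 1)
            let a1 := st.1.modify i [] (fun l => l ++ [j])
            let a2 := a1.modify j [] (fun l => l ++ [i])
            (a2, m2)) st)
      (adjacency_list, adjacency_matrix)
  (final.1.items, final.2)

-- ===== PORT B =====
def generate_fully_connected_graph_alt (num_vertices : Int) : (List (Int × List Int)) × List (List Int) :=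
  ((PySem.List.pyRange 0 num_vertices 1).map (fun i =>
      (i, (PySem.List.pyRange 0 num_vertices 1).filter (fun j => decide (j ≠ i)))),
   (PySem.List.pyRange 0 num_vertices 1).map (fun i =>
      (PySem.List.pyRange 0 num_vertices 1).map (fun j => if j ≠ i then (1 : Int) else 0)))

-- ===== PRECONDITION & SPEC =====
def Spec_generate_fully_connected_graph (num_vertices : Int) (out : (List (Int × List Int)) × List (List Int)) : Prop := out = generate_fully_connected_graph_alt num_vertices
instance (num_vertices : Int) (out : (List (Int × List Int)) × List (List Int)) : Decidable (Spec_generate_fully_connected_graph num_vertices out) := by unfold Spec_generate_fully_connected_graph; infer_instance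

-- ===== CLAIM (what is proved, stated in full; the proofs are below) =====
def Claim_equal_generate_fully_connected_graph : Prop := ∀ (num_vertices : Int), Dom_generate_fully_connected_graph num_vertices → Spec_generate_fully_connected_graph num_vertices (generate_fully_connected_graph num_vertices)

-- ===== LEMMAS AND PROOFS =====

-- the pairs A's double loop processes, in order, each unordered edge in both orientations
def pvPairs (n : Int) : List (Int × Int) :=
  (PySem.List.pyRange 0 n 1).flatMap (fun i =>
    (PySem.List.pyRange (i + 1) n 1).flatMap (fun j => [(i, j), (j, i)]))

def pvDStep (d : PySem.Dict Int (List Int)) (p : Int × Int) : PySem.Dict Int (List Int) :=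
  d.modify p.1 [] (fun l => l ++ [p.2])

def pvMStep (m : List (List Int)) (p : Int × Int) : List (List Int) :=
  PySem.List.pySetD m p.1 (PySem.List.pySetD (PySem.List.pyGetD m p.1 []) p.2 1)

def pvMatOf (n : Int) (P : Int → Int → Bool) : List (List Int) :=
  (PySem.List.pyRange 0 n 1).map (fun a =>
    (PySem.List.pyRange 0 n 1).map (fun b => if P a b then (1 : Int) else 0))

lemma pvMatOf_congr (n : Int) {P Q : Int → Int → Bool} (h : ∀ a b, P a b = Q a b) :
    pvMatOf n P = pvMatOf n Q := by
  have : P = Q := funext fun a => funext fun b => h a b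
  rw [this]

lemma pvPairs_bounds (n : Int) : ∀ p ∈ pvPairs n, 0 ≤ p.1 ∧ p.1 < n ∧ 0 ≤ p.2 ∧ p.2 < n := by
  intro p hp
  simp only [pvPairs, List.mem_flatMap, PySem.List.mem_pyRange_one, List.mem_cons, List.not_mem_nil, or_false] at hp
  obtain ⟨i, hi, j, hj, h | h⟩ := hp <;> subst h <;> simp <;> omega

lemma mem_pvPairs (n a b : Int) :
    (a, b) ∈ pvPairs n ↔ 0 ≤ a ∧ a < n ∧ 0 ≤ b ∧ b < n ∧ a ≠ b := by
  simp only [pvPairs, List.mem_flatMap, PySem.List.mem_pyRange_one, List.mem_cons, List.not_mem_nil, or_false, Prod.mk.injEq]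
  constructor
  · rintro ⟨i, hi, j, hj, ⟨rfl, rfl⟩ | ⟨rfl, rfl⟩⟩ <;> omega
  · rintro ⟨h0a, han, h0b, hbn, hab⟩
    rcases lt_or_gt_of_ne hab with h | h
    · exact ⟨a, by omega, b, by omega, Or.inl ⟨rfl, rfl⟩⟩
    · exact ⟨b, by omega, a, by omega, Or.inr ⟨rfl, rfl⟩⟩

-- A's double fold is the fold of one pair step over pvPairs
lemma pvFold_eq (n : Int) (st0 : PySem.Dict Int (List Int) × List (List Int)) :
    (PySem.List.pyRange 0 n 1).foldl
      (fun (st : PySem.Dict Int (List Int) × List (List Int)) i =>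
        (PySem.List.pyRange (i + 1) n 1).foldl
          (fun (st : PySem.Dict Int (List Int) × List (List Int)) j =>
            ((st.1.modify i [] (fun l => l ++ [j])).modify j [] (fun l => l ++ [i]),
             PySem.List.pySetD
               (PySem.List.pySetD st.2 i (PySem.List.pySetD (PySem.List.pyGetD st.2 i []) j 1)) j
               (PySem.List.pySetD
                 (PySem.List.pyGetD
                   (PySem.List.pySetD st.2 i (PySem.List.pySetD (PySem.List.pyGetD st.2 i []) j 1))
                   j [])
                 i 1))) st) st0
    = (pvPairs n).foldl (fun st p => (pvDStep st.1 p, pvMStep st.2 p)) st0 := by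
  unfold pvPairs
  rw [List.foldl_flatMap]
  apply PySem.List.foldl_congr_mem
  intro st i _
  rw [List.foldl_flatMap]
  apply PySem.List.foldl_congr_mem
  intro st' j _
  rfl

lemma pvFold_split (n : Int) (d0 : PySem.Dict Int (List Int)) (m0 : List (List Int)) :
    (pvPairs n).foldl (fun st p => (pvDStep st.1 p, pvMStep st.2 p)) (d0, m0)
      = ((pvPairs n).foldl pvDStep d0, (pvPairs n).foldl pvMStep m0) :=
  PySem.List.foldl_prod_mk pvDStep pvMStep (pvPairs n) d0 m0

-- setting one cell of a range-indexed matrix row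
lemma pvSet_map_range {α : Type} (N : Nat) (h : Int → α) (k : Nat) (_hk : k < N) (v : α) :
    ((PySem.List.pyRange 0 (N : Int) 1).map h).set k v
      = (PySem.List.pyRange 0 (N : Int) 1).map (fun b => if b = (k : Int) then v else h b) := by
  apply List.ext_getElem
  · simp [PySem.List.length_pyRange_one]
  · intro p h1 h2
    simp only [List.getElem_set, List.getElem_map, PySem.List.getElem_pyRange_one]
    split_ifs with e1 e2 e2 <;> first | rfl | (exfalso; omega)

lemma pvMStep_matOf (n : Int) (P : Int → Int → Bool) (i j : Int)
    (hi0 : 0 ≤ i) (hin : i < n) (hj0 : 0 ≤ j) (hjn : j < n) :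
    pvMStep (pvMatOf n P) (i, j) = pvMatOf n (fun a b => P a b || (a == i && b == j)) := by
  have hn0 : 0 ≤ n := by omega
  have hN : ((n.toNat : Nat) : Int) = n := Int.toNat_of_nonneg hn0
  have hi : ((i.toNat : Nat) : Int) = i := Int.toNat_of_nonneg hi0
  have hj : ((j.toNat : Nat) : Int) = j := Int.toNat_of_nonneg hj0
  rw [← hN, ← hi, ← hj]
  unfold pvMStep pvMatOf
  simp only []
  rw [PySem.List.pyGetD_map_pyRange _ n.toNat i.toNat _ (by omega),
    PySem.List.pySetD_of_nonneg _ _ (by positivity),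
    PySem.List.pySetD_of_nonneg _ _ (by positivity),
    Int.toNat_natCast, Int.toNat_natCast,
    pvSet_map_range n.toNat _ j.toNat (by omega),
    pvSet_map_range n.toNat _ i.toNat (by omega)]
  apply List.map_congr_left
  intro a _
  by_cases ha : a = ((i.toNat : Nat) : Int)
  · rw [if_pos ha, ha]
    apply List.map_congr_left
    intro b _
    by_cases hb : b = ((j.toNat : Nat) : Int)
    · simp [hb]
    · rw [if_neg hb]
      have hb' : (b == ((j.toNat : Nat) : Int)) = false := by
        rw [beq_eq_decide]; exact decide_eq_false hb
      simp only [hb', Bool.and_false, Bool.or_false]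
  · rw [if_neg ha]
    apply List.map_congr_left
    intro b _
    have ha' : (a == ((i.toNat : Nat) : Int)) = false := by
      rw [beq_eq_decide]; exact decide_eq_false ha
    simp only [ha', Bool.false_and, Bool.or_false]

lemma pvFold_mstep (n : Int) (ps : List (Int × Int)) (P : Int → Int → Bool)
    (hps : ∀ p ∈ ps, 0 ≤ p.1 ∧ p.1 < n ∧ 0 ≤ p.2 ∧ p.2 < n) :
    ps.foldl pvMStep (pvMatOf n P) = pvMatOf n (fun a b => P a b || ps.contains (a, b)) := by
  induction ps generalizing P with
  | nil =>
    rw [List.foldl_nil]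
    exact pvMatOf_congr n (fun a b => by simp)
  | cons p t ih =>
    obtain ⟨h1, h2, h3, h4⟩ := hps p List.mem_cons_self
    rw [List.foldl_cons]
    rw [show p = (p.1, p.2) from rfl, pvMStep_matOf n P p.1 p.2 h1 h2 h3 h4,
      ih _ (fun q hq => hps q (List.mem_cons_of_mem _ hq))]
    apply pvMatOf_congr
    intro a b
    cases p with
    | mk c d => simp [Prod.mk.injEq, Bool.or_assoc, Bool.decide_and, beq_eq_decide]

-- helpers about flatMap
lemma pvFlatMap_congr {α β : Type} (l : List α) (f g : α → List β)
    (h : ∀ x ∈ l, f x = g x) : l.flatMap f = l.flatMap g := by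
  induction l with
  | nil => rfl
  | cons x t ih =>
    simp only [List.flatMap_cons, h x List.mem_cons_self,
      ih (fun y hy => h y (List.mem_cons_of_mem _ hy))]

lemma pvFlatMap_id (l : List Int) (f : Int → List Int) (h : ∀ x ∈ l, f x = [x]) :
    l.flatMap f = l := by
  rw [pvFlatMap_congr l f (fun x => [x]) h, List.flatMap_singleton']

lemma pvFlatMap_find (l : List Int) (c v : Int) (hnd : l.Nodup) :
    l.flatMap (fun j => if j = c then [v] else []) = if c ∈ l then [v] else [] := by
  induction l with
  | nil => simp
  | cons x t ih =>
    rw [List.flatMap_cons, ih hnd.of_cons]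
    by_cases hx : x = c
    · subst hx
      have : x ∉ t := (List.nodup_cons.mp hnd).1
      simp [this]
    · simp [hx, Ne.symm hx]

-- the neighbours appended to vertex c by A's loop, in order
lemma pvFilter_pairs (n c : Int) (hc0 : 0 ≤ c) (hcn : c < n) :
    ((pvPairs n).filter (fun p => p.1 == c)).map (fun p => p.2)
      = (PySem.List.pyRange 0 n 1).filter (fun j => decide (j ≠ c)) := by
  have block : ∀ i : Int, 0 ≤ i →
      (((PySem.List.pyRange (i + 1) n 1).flatMap (fun j => [(i, j), (j, i)])).filter
          (fun p => p.1 == c)).map (fun p => p.2)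
        = (if i = c then PySem.List.pyRange (c + 1) n 1 else if i < c then [i] else []) := by
    intro i hi0
    rw [List.filter_flatMap, List.map_flatMap]
    by_cases hic : i = c
    · subst hic
      rw [if_pos rfl]
      apply pvFlatMap_id
      intro j hj
      have hji : i + 1 ≤ j := (PySem.List.mem_pyRange_one.mp hj).1
      have hne : j ≠ i := by omega
      simp [beq_eq_decide, hne]
    · rw [if_neg hic]
      have : ∀ j ∈ PySem.List.pyRange (i + 1) n 1,
          (List.map (fun p => p.2) (List.filter (fun p => p.1 == c) [(i, j), (j, i)]))
            = (if j = c then [i] else []) := by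
        intro j hj
        by_cases hjc : j = c
        · subst hjc; simp [beq_eq_decide, hic]
        · simp [beq_eq_decide, hic, hjc]
      rw [pvFlatMap_congr _ _ _ this,
        pvFlatMap_find _ _ _ (PySem.List.nodup_pyRange_one _ _)]
      by_cases hlt : i < c
      · rw [if_pos (PySem.List.mem_pyRange_one.mpr (by omega)), if_pos hlt]
      · rw [if_neg (by rw [PySem.List.mem_pyRange_one]; omega), if_neg hlt]
  unfold pvPairs
  rw [List.filter_flatMap, List.map_flatMap]
  rw [pvFlatMap_congr _ _ _ (fun i hi => block i (PySem.List.mem_pyRange_one.mp hi).1)]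
  rw [PySem.List.pyRange_one_append 0 c n hc0 (by omega),
    PySem.List.pyRange_one_cons hcn]
  rw [List.flatMap_append, List.flatMap_cons, List.filter_append, List.filter_cons]
  have h1 : (PySem.List.pyRange 0 c 1).flatMap
      (fun i => if i = c then PySem.List.pyRange (c + 1) n 1 else if i < c then [i] else [])
      = PySem.List.pyRange 0 c 1 := by
    apply pvFlatMap_id
    intro x hx
    have := PySem.List.mem_pyRange_one.mp hx
    rw [if_neg (by omega), if_pos (by omega)]
  have h2 : (PySem.List.pyRange (c + 1) n 1).flatMap
      (fun i => if i = c then PySem.List.pyRange (c + 1) n 1 else if i < c then [i] else [])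
      = [] := by
    rw [List.flatMap_eq_nil_iff]
    intro x hx
    have := PySem.List.mem_pyRange_one.mp hx
    rw [if_neg (by omega), if_neg (by omega)]
  have h3 : List.filter (fun j => !decide (j = c)) (PySem.List.pyRange 0 c 1)
      = PySem.List.pyRange 0 c 1 := by
    rw [List.filter_eq_self]
    intro x hx
    have := PySem.List.mem_pyRange_one.mp hx
    simp; omega
  have h4 : List.filter (fun j => !decide (j = c)) (PySem.List.pyRange (c + 1) n 1)
      = PySem.List.pyRange (c + 1) n 1 := by
    rw [List.filter_eq_self]
    intro x hx
    have := PySem.List.mem_pyRange_one.mp hx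
    simp; omega
  simp [h1, h2, h3, h4]

lemma pvSet_update_self (s l : List Int) (h : ∀ x ∈ l, x ∈ s) :
    PySem.Set.update s l = s := by
  induction l generalizing s with
  | nil => rfl
  | cons x t ih =>
    have hx : PySem.Set.add s x = s := by
      simp [PySem.Set.add, h x List.mem_cons_self]
    simp only [PySem.Set.update, List.foldl_cons, hx]
    exact ih s (fun y hy => h y (List.mem_cons_of_mem _ hy))

-- ===== VERDICT (by name: the statement is the Claim_ definition above) =====
theorem generate_fully_connected_graph_spec : Claim_equal_generate_fully_connected_graph := by
  intro n _
  unfold Spec_generate_fully_connected_graph generate_fully_connected_graph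
    generate_fully_connected_graph_alt
  dsimp only
  rw [pvFold_eq n, pvFold_split]
  rw [Prod.mk.injEq]
  constructor
  · -- adjacency list component
    have hitems0 : ((PySem.List.pyRange 0 n 1).foldl
        (fun (d : PySem.Dict Int (List Int)) vertex => d.insert vertex []) PySem.Dict.empty).items
        = (PySem.List.pyRange 0 n 1).map (fun v => (v, ([] : List Int))) := by
      have := PySem.Dict.items_foldl_insert_fresh (PySem.List.pyRange 0 n 1)
        (fun a => a) (fun _ => ([] : List Int)) PySem.Dict.empty
        (by intro a _; simp) (by simpa using PySem.List.nodup_pyRange_one 0 n)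
      simpa using this
    have hkeys0 : ((PySem.List.pyRange 0 n 1).foldl
        (fun (d : PySem.Dict Int (List Int)) vertex => d.insert vertex []) PySem.Dict.empty).keys
        = PySem.List.pyRange 0 n 1 := by
      simp only [PySem.Dict.keys, hitems0, List.map_map]
      have hcomp : ((fun (x : Int × List Int) => x.1) ∘ fun v : Int => (v, ([] : List Int))) = id := rfl
      rw [hcomp, List.map_id]
    have hshape : List.foldl pvDStep
        ((PySem.List.pyRange 0 n 1).foldl
          (fun (d : PySem.Dict Int (List Int)) vertex => d.insert vertex []) PySem.Dict.empty)
        (pvPairs n)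
        = List.foldl (fun (d : PySem.Dict Int (List Int)) p => d.modify p.1 [] (fun l => l ++ [p.2]))
          ((PySem.List.pyRange 0 n 1).foldl
            (fun (d : PySem.Dict Int (List Int)) vertex => d.insert vertex []) PySem.Dict.empty)
          (pvPairs n) := rfl
    rw [hshape]
    have hkeysD : (List.foldl (fun (d : PySem.Dict Int (List Int)) p => d.modify p.1 [] (fun l => l ++ [p.2]))
          ((PySem.List.pyRange 0 n 1).foldl
            (fun (d : PySem.Dict Int (List Int)) vertex => d.insert vertex []) PySem.Dict.empty)
          (pvPairs n)).keys = PySem.List.pyRange 0 n 1 := by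
      rw [PySem.Dict.keys_foldl_modify_key (pvPairs n) (fun p => p.1) []
        (fun _ p => fun l => l ++ [p.2]), hkeys0]
      apply pvSet_update_self
      intro x hx
      rw [List.mem_map] at hx
      obtain ⟨p, hp, rfl⟩ := hx
      have := pvPairs_bounds n p hp
      exact PySem.List.mem_pyRange_one.mpr ⟨this.1, this.2.1⟩
    rw [PySem.Dict.items_eq_map_keys _ (by rw [hkeysD]; exact PySem.List.nodup_pyRange_one 0 n) []]
    rw [hkeysD]
    apply List.map_congr_left
    intro c hc
    have hcb := PySem.List.mem_pyRange_one.mp hc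
    rw [Prod.mk.injEq]
    refine ⟨rfl, ?_⟩
    rw [PySem.Dict.getD_foldl_modify_append (pvPairs n) _ c]
    have hget0 : ((PySem.List.pyRange 0 n 1).foldl
        (fun (d : PySem.Dict Int (List Int)) vertex => d.insert vertex []) PySem.Dict.empty).getD c []
        = [] := by
      apply PySem.Dict.getD_of_mem_items
      · rw [hitems0, List.mem_map]
        exact ⟨c, hc, rfl⟩
      · rw [hkeys0]
        exact PySem.List.nodup_pyRange_one 0 n
    rw [hget0, List.nil_append]
    exact pvFilter_pairs n c hcb.1 hcb.2
  · -- adjacency matrix component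
    have hmat0 : (PySem.List.pyRange 0 n 1).map
        (fun _ => (PySem.List.pyRange 0 n 1).map (fun _ => (0 : Int)))
        = pvMatOf n (fun _ _ => false) := by
      unfold pvMatOf
      simp
    rw [hmat0, pvFold_mstep n _ _ (pvPairs_bounds n)]
    unfold pvMatOf
    apply List.map_congr_left
    intro a ha
    apply List.map_congr_left
    intro b hb
    have ha' := PySem.List.mem_pyRange_one.mp ha
    have hb' := PySem.List.mem_pyRange_one.mp hb
    simp only [Bool.false_or, List.contains_iff_mem, mem_pvPairs]
    split_ifs <;> first | rfl | omega
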